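-- pv_equiv track=rewrite | github.com/thealper2/codewars-solutions | 7-kyu/validate_the_euro_bill.py | validate_euro
-- ===== SOURCE A (Python) =====
-- def validate_euro(serial):
--     letter1 = ord(serial[0]) - ord('A') + 1
--     letter2 = ord(serial[1]) - ord('A') + 1
--     digit_sum = sum(int(d) for d in serial[2:])
--     total = letter1 + letter2 + digit_sum
--     while total >= 10:
--         total = sum(int(d) for d in str(total))
--
--     return total == 7
-- ===== SOURCE B (Python) =====
-- def validate_euro(serial):
--     letter1 = ord(serial[0]) - ord('A') + 1
--     letter2 = ord(serial[1]) - ord('A') + 1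
--     digit_sum = sum(int(d) for d in serial[2:])
--     total = letter1 + letter2 + digit_sum
--     if total < 10:
--         return total == 7
--     return (total - 1) % 9 + 1 == 7
-- ===== Notes on version B (the rewrite author's own statement) =====
-- stated objective: simpler
-- what changed: The iterative repeated digit-sum reduction (while total >= 10: re-sum the digits of str(total)) is replaced by the constant-time digital-root closed form (total - 1) % 9 + 1, with the total < 10 case returned directly (which also guards negative totals).
import Mathlib
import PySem

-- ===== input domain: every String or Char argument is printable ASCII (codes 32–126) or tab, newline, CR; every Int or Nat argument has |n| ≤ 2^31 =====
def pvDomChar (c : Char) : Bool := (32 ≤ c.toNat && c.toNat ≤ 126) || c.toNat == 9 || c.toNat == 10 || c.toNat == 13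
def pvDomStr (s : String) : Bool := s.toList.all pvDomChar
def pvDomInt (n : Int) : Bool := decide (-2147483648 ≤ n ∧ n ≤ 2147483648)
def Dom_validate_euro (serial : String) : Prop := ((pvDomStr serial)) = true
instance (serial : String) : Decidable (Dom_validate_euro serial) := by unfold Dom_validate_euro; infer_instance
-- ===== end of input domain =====

-- B replaces A's iterative digit-sum reduction loop by the digital-root closed form; objective: simpler.

-- ===== PORT A =====

-- int(d) for a single ASCII digit character d (Pre_ restricts serial[2:] to digits, where this is exact)
def pvDigitVal (c : Char) : Int := (c.toNat : Int) - 48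

-- sum(int(d) for d in str(total)) — str(total) via PySem.Int.toChars
def pvStrDigitSum (n : Int) : Int := ((PySem.Int.toChars n).map pvDigitVal).sum

-- repeated-digit-sum helper used only to prove the loop terminates
def pvSd (m : Nat) : Nat := if m < 10 then m else pvSd (m / 10) + m % 10

theorem pvSd_lt (m : Nat) (h : 10 ≤ m) : pvSd m < m := by
  induction m using Nat.strong_induction_on with
  | _ m ih =>
    rw [pvSd, if_neg (by omega)]
    by_cases h2 : m / 10 < 10
    · rw [pvSd, if_pos h2]; omega
    · have := ih (m / 10) (by omega) (by omega); omega

theorem pvCsum_toDigitsCore (f : Nat) :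
    ∀ (m : Nat) (l : List Char), m < f →
      ((Nat.toDigitsCore 10 f m l).map pvDigitVal).sum
        = (pvSd m : Int) + ((l.map pvDigitVal).sum) := by
  induction f with
  | zero => intro m l h; omega
  | succ f ih =>
    intro m l h
    have hchar : ∀ d : Nat, d < 10 → pvDigitVal (Nat.digitChar d) = (d : Int) := by
      intro d hd; interval_cases d <;> decide
    rw [Nat.toDigitsCore]
    by_cases h0 : m / 10 = 0
    · have hm : m < 10 := by omega
      have hstep : pvSd m = m := by rw [pvSd, if_pos hm]
      simp only [h0, if_pos, List.map_cons, List.sum_cons, hchar (m % 10) (by omega), hstep]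
      have : m % 10 = m := Nat.mod_eq_of_lt hm
      rw [this]
    · rw [if_neg h0]
      rw [ih (m / 10) (Nat.digitChar (m % 10) :: l) (by omega)]
      have hstep : pvSd m = pvSd (m / 10) + m % 10 := by
        conv_lhs => rw [pvSd]
        rw [if_neg (by omega)]
      simp only [List.map_cons, List.sum_cons, hchar (m % 10) (by omega), hstep]
      push_cast
      ring

theorem pvCsum_toDigits (m : Nat) :
    ((Nat.toDigits 10 m).map pvDigitVal).sum = (pvSd m : Int) := by
  have := pvCsum_toDigitsCore (m + 1) m [] (by omega)
  simpa [Nat.toDigits] using this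

theorem pvStrDigitSum_eq (n : Int) (h : 0 ≤ n) : pvStrDigitSum n = (pvSd n.toNat : Int) := by
  rw [pvStrDigitSum, PySem.Int.toChars, if_neg (by omega)]
  exact pvCsum_toDigits n.toNat

-- the while loop of A: while total >= 10: total = sum(int(d) for d in str(total))
def pvReduce (total : Int) : Int :=
  if 10 ≤ total then pvReduce (pvStrDigitSum total) else total
termination_by total.toNat
decreasing_by
  rw [pvStrDigitSum_eq total (by omega)]
  have h10 : 10 ≤ total.toNat := by omega
  have := pvSd_lt total.toNat h10
  omega

def validate_euro (serial : String) : Bool :=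
  let cs := serial.toList
  match PySem.List.pyGet? cs 0, PySem.List.pyGet? cs 1 with
  | some c0, some c1 =>
    let letter1 : Int := (c0.toNat : Int) - 65 + 1
    let letter2 : Int := (c1.toNat : Int) - 65 + 1
    let digit_sum : Int := ((PySem.List.slice cs (some 2) none).map pvDigitVal).sum
    pvReduce (letter1 + letter2 + digit_sum) == 7
  | _, _ => false   -- unreachable under Pre_: Python raises IndexError

-- ===== PORT B =====
def validate_euro_alt (serial : String) : Bool :=
  let cs := serial.toList
  match PySem.List.pyGet? cs 0 with
  | none => false   -- unreachable under Pre_: Python raises IndexError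
  | some c0 =>
    match PySem.List.pyGet? cs 1 with
    | none => false   -- unreachable under Pre_: Python raises IndexError
    | some c1 =>
      let letter1 : Int := (c0.toNat : Int) - 65 + 1
      let letter2 : Int := (c1.toNat : Int) - 65 + 1
      let digit_sum : Int := ((PySem.List.slice cs (some 2) none).map (fun c => (c.toNat : Int) - 48)).sum
      let total := letter1 + letter2 + digit_sum
      if total < 10 then total == 7
      else (PySem.Int.mod (total - 1) 9 + 1) == 7

-- ===== PRECONDITION & SPEC =====
-- Pre_ excludes exactly the inputs where A raises: strings shorter than 2 (IndexError on serial[1])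
-- and strings with a non-digit character after position 2 (ValueError in int(d)).
def Pre_validate_euro (serial : String) : Prop :=
  2 ≤ serial.toList.length ∧ (serial.toList.drop 2).all Char.isDigit = true
instance (serial : String) : Decidable (Pre_validate_euro serial) := by
  unfold Pre_validate_euro; infer_instance
def pvWitness_validate_euro : String := "XS1234"

def Spec_validate_euro (serial : String) (out : Bool) : Prop := out = validate_euro_alt serial
instance (serial : String) (out : Bool) : Decidable (Spec_validate_euro serial out) := by
  unfold Spec_validate_euro; infer_instance

-- ===== CLAIM (what is proved, stated in full; the proofs are below) =====
def Claim_equal_validate_euro : Prop := ∀ (serial : String), Dom_validate_euro serial → Pre_validate_euro serial → Spec_validate_euro serial (validate_euro serial)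

-- ===== LEMMAS AND PROOFS =====

theorem pvSd_mod9 (m : Nat) : pvSd m % 9 = m % 9 := by
  induction m using Nat.strong_induction_on with
  | _ m ih =>
    by_cases h : m < 10
    · rw [pvSd, if_pos h]
    · rw [pvSd, if_neg h]
      have := ih (m / 10) (by omega)
      omega

theorem pvSd_pos (m : Nat) (h : 1 ≤ m) : 1 ≤ pvSd m := by
  induction m using Nat.strong_induction_on with
  | _ m ih =>
    by_cases h10 : m < 10
    · rw [pvSd, if_pos h10]; omega
    · rw [pvSd, if_neg h10]
      have := ih (m / 10) (by omega) (by omega)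
      omega

-- the digital root: the while loop computes (m-1) % 9 + 1 for positive m
theorem pvReduce_eq (m : Nat) (h : 1 ≤ m) : pvReduce (m : Int) = ((m - 1) % 9 + 1 : Nat) := by
  induction m using Nat.strong_induction_on with
  | _ m ih =>
    by_cases h10 : m < 10
    · rw [pvReduce, if_neg (by omega)]
      have : (m - 1) % 9 + 1 = m := by omega
      rw [this]
    · rw [pvReduce, if_pos (by omega)]
      rw [pvStrDigitSum_eq (m : Int) (by omega)]
      have htn : ((m : Int)).toNat = m := by omega
      rw [htn]
      have hlt := pvSd_lt m (by omega)
      have hpos := pvSd_pos m (by omega)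
      rw [ih (pvSd m) hlt hpos]
      have hmod := pvSd_mod9 m
      congr 1
      omega

theorem pvFmod_nonneg_eq (a : Int) : PySem.Int.mod a 9 = a % 9 := by
  rw [PySem.Int.mod]
  simp [Int.fmod_eq_emod]

theorem pvReduce_closed (t : Int) :
    pvReduce t = if t < 10 then t else PySem.Int.mod (t - 1) 9 + 1 := by
  by_cases h : t < 10
  · rw [pvReduce, if_neg (by omega), if_pos h]
  · rw [if_neg h]
    have h1 : t = ((t.toNat : Nat) : Int) := by omega
    rw [pvFmod_nonneg_eq (t - 1)]
    rw [h1, pvReduce_eq t.toNat (by omega)]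
    have : (1:Nat) ≤ t.toNat := by omega
    omega

-- ===== VERDICT (by name: the statement is the Claim_ definition above) =====
theorem validate_euro_spec : Claim_equal_validate_euro := by
  intro serial _ _
  unfold Spec_validate_euro validate_euro validate_euro_alt
  cases h0 : PySem.List.pyGet? serial.toList 0 <;>
      cases h1 : PySem.List.pyGet? serial.toList 1 <;>
    simp only [h0, h1]
  rw [show (fun c : Char => (c.toNat : Int) - 48) = pvDigitVal from rfl]
  rw [pvReduce_closed]
  split_ifs <;> rfl
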